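-- pv_equiv track=rewrite | github.com/meticulousdev/ClassicComputerScienceProblemsInPython | CP_Chapter03/2020/Exercise/exer_overlapping_letters.py | generate_domain
-- ===== SOURCE A (Python) =====
-- from typing import NamedTuple, Tuple, List, Dict, Optional
--
-- Grid = List[List[str]]
--
-- class GridLocation(NamedTuple):
--     row: int
--     column: int
--
-- def generate_domain(word: str, grid: Grid) -> List[List[GridLocation]]:
--     domain: List[List[GridLocation]] = []
--     height: int = len(grid)
--     width: int = len(grid[0])
--     length: int = len(word)
--
--     for row in range(height):
--         for col in range(width):
--             columns: range = range(col, col + length + 1)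
--             rows: range = range(row, row + length + 1)
--             if col + length <= width:
--                 domain.append([GridLocation(row, c) for c in columns])
--                 if row + length <= height:
--                     domain.append([GridLocation(r, col + (r - row)) for r in rows])
--             if row + length <= height:
--                 domain.append([GridLocation(r, col) for r in rows])
--                 if col - length >= 0:
--                     domain.append([GridLocation(r, col - (r - row)) for r in rows])
--     return domain
-- ===== SOURCE B (Python) =====
-- from typing import NamedTuple, List
--
-- Grid = List[List[str]]
--
-- class GridLocation(NamedTuple):
--     row: int
--     column: int
--
-- def generate_domain(word: str, grid: Grid) -> List[List[GridLocation]]: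
--     height = len(grid)
--     width = len(grid[0])
--     n = len(word)
--
--     def walk(r: int, c: int, dr: int, dc: int, k: int) -> List[GridLocation]:
--         # segment built by recursive coordinate stepping
--         if k <= 0:
--             return []
--         return [GridLocation(r, c)] + walk(r + dr, c + dc, dr, dc, k - 1)
--
--     # stage 1: per-column direction templates, computed once per column
--     templates = []
--     for col in range(width):
--         right = col + n <= width
--         t_short = [(0, 1)] if right else []
--         t_full = t_short + ([(1, 1)] if right else []) + [(1, 0)] \
--                  + ([(1, -1)] if col - n >= 0 else [])
--         templates.append((t_short, t_full))
--
--     # stage 2: sweep the rows, replaying the column templates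
--     domain: List[List[GridLocation]] = []
--     for row in range(height):
--         full = row + n <= height
--         for col, (t_short, t_full) in enumerate(templates):
--             for dr, dc in (t_full if full else t_short):
--                 domain.append(walk(row, col, dr, dc, n + 1))
--     return domain
-- ===== Notes on version B (the rewrite author's own statement) =====
-- stated objective: alternative
-- what changed: A recomputes four nested bounds-checked comprehensions at every cell; B is staged: it precomputes per-column direction templates once (short/full variants), then sweeps the rows replaying each column's template, and builds each segment by a recursive coordinate walk instead of comprehensions over absolute index ranges.
-- outside the precondition, e.g. on generate_domain('ab', []): A raises IndexError, B raises IndexError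
import Mathlib
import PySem

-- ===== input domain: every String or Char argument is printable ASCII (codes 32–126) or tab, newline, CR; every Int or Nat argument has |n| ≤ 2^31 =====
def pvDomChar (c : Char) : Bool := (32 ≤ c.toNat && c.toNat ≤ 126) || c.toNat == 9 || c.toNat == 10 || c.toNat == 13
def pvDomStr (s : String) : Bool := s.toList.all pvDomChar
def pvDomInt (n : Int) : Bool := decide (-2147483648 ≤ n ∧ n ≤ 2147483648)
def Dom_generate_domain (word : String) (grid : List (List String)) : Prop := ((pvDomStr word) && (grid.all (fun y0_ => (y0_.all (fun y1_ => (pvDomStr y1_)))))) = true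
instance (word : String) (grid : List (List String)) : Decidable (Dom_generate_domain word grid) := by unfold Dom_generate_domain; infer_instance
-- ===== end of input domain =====

-- B stages the work: per-column direction templates are computed once, then the row sweep
-- replays them, building each segment by a recursive coordinate walk (objective: alternative).

-- ===== PORT A =====
def generate_domain (word : String) (grid : List (List String)) : List (List (Int × Int)) :=
  let height : Int := grid.length
  let width : Int := (((PySem.List.pyGet? grid 0).getD []).length : Int)  -- grid[0]; Pre_ excludes grid = []
  let length : Int := PySem.Str.len word
  (PySem.List.pyRange 0 height 1).foldl (fun domain row =>
    (PySem.List.pyRange 0 width 1).foldl (fun domain col =>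
      let columns : List Int := PySem.List.pyRange col (col + length + 1) 1
      let rows : List Int := PySem.List.pyRange row (row + length + 1) 1
      let domain :=
        if col + length ≤ width then
          let domain := domain ++ [columns.map (fun c => (row, c))]
          if row + length ≤ height then
            domain ++ [rows.map (fun r => (r, col + (r - row)))]
          else domain
        else domain
      if row + length ≤ height then
        let domain := domain ++ [rows.map (fun r => (r, col))]
        if col - length ≥ 0 then
          domain ++ [rows.map (fun r => (r, col - (r - row)))]
        else domain
      else domain) domain) []

-- ===== PORT B =====
-- B's recursive `walk`: segment built by stepping the coordinates
def pvWalk (r c dr dc k : Int) : List (Int × Int) :=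
  if h : k ≤ 0 then [] else (r, c) :: pvWalk (r + dr) (c + dc) dr dc (k - 1)
termination_by k.toNat
decreasing_by omega

-- B's stage 1: per-column (t_short, t_full) direction templates
def pvTemplates (width n : Int) : List (List (Int × Int) × List (Int × Int)) :=
  (PySem.List.pyRange 0 width 1).map (fun col =>
    let t_short : List (Int × Int) := if col + n ≤ width then [(0, 1)] else []
    let t_full : List (Int × Int) :=
      t_short ++ (if col + n ≤ width then [(1, 1)] else []) ++ [(1, 0)]
        ++ (if col - n ≥ 0 then [(1, -1)] else [])
    (t_short, t_full))

def generate_domain_alt (word : String) (grid : List (List String)) : List (List (Int × Int)) :=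
  let height : Int := grid.length
  let width : Int := (((PySem.List.pyGet? grid 0).getD []).length : Int)  -- grid[0]; Pre_ excludes grid = []
  let n : Int := PySem.Str.len word
  let templates := pvTemplates width n
  (PySem.List.pyRange 0 height 1).foldl (fun domain row =>
    let full := row + n ≤ height
    (PySem.List.enumerate templates 0).foldl (fun domain ct =>
      (if full then ct.2.2 else ct.2.1).foldl (fun domain d =>
        domain ++ [pvWalk row ct.1 d.1 d.2 (n + 1)]) domain) domain) []

-- ===== PRECONDITION & SPEC =====
-- Pre_ excludes only grid = [], on which Python A raises IndexError at grid[0].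
def Pre_generate_domain (word : String) (grid : List (List String)) : Prop := grid ≠ []
instance (word : String) (grid : List (List String)) : Decidable (Pre_generate_domain word grid) := by unfold Pre_generate_domain; infer_instance
def pvWitness_generate_domain : String × List (List String) := ("ab", [["x", "y", "z"], ["x", "y", "z"]])
def Spec_generate_domain (word : String) (grid : List (List String)) (out : List (List (Int × Int))) : Prop := out = generate_domain_alt word grid
instance (word : String) (grid : List (List String)) (out : List (List (Int × Int))) : Decidable (Spec_generate_domain word grid out) := by unfold Spec_generate_domain; infer_instance

-- ===== CLAIM (what is proved, stated in full; the proofs are below) =====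
def Claim_equal_generate_domain : Prop := ∀ (word : String) (grid : List (List String)), Dom_generate_domain word grid → Pre_generate_domain word grid → Spec_generate_domain word grid (generate_domain word grid)

-- ===== LEMMAS AND PROOFS =====

-- enumerating the map of a 0-based range pairs each column with its template
lemma pv_enum_gen {α : Type} (a w : Int) (f : Int → α) :
    PySem.List.enumerate ((PySem.List.pyRange a w 1).map f) a =
      (PySem.List.pyRange a w 1).map (fun j => (j, f j)) := by
  by_cases h : w ≤ a
  · simp [PySem.List.pyRange_one_eq_nil h]
  · rw [PySem.List.pyRange_one_cons (by omega)]
    simp only [List.map_cons, PySem.List.enumerate_cons]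
    rw [pv_enum_gen (a + 1) w f]
termination_by (w - a).toNat
decreasing_by omega

lemma pv_enumerate_map_range {α : Type} (w : Int) (f : Int → α) :
    PySem.List.enumerate ((PySem.List.pyRange 0 w 1).map f) 0 =
      (PySem.List.pyRange 0 w 1).map (fun j => (j, f j)) :=
  pv_enum_gen 0 w f

-- a shifted index range, re-indexed from 0
lemma pv_mapseg (a L : Int) (f g : Int → Int × Int) (hfg : ∀ k : Int, f (a + k) = g k) :
    (PySem.List.pyRange a (a + L) 1).map f = (PySem.List.pyRange 0 L 1).map g := by
  rw [PySem.List.pyRange_one a (a + L), PySem.List.pyRange_one 0 L, List.map_map, List.map_map]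
  have h1 : a + L - a = L := by ring
  have h2 : L - 0 = L := by ring
  rw [h1, h2]
  refine List.map_congr_left (fun k _ => ?_)
  simpa using hfg (k : Int)

-- the recursive walk, as a map over a 0-based index range
lemma pv_walk_eq (r c dr dc L : Int) :
    pvWalk r c dr dc L = (PySem.List.pyRange 0 L 1).map (fun k => (r + k * dr, c + k * dc)) := by
  by_cases h : L ≤ 0
  · rw [pvWalk, PySem.List.pyRange_one_eq_nil h]
    simp [h]
  · rw [pvWalk]
    simp only [h, dite_false]
    rw [PySem.List.pyRange_one_cons (by omega : (0:Int) < L), List.map_cons,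
      pv_walk_eq (r + dr) (c + dc) dr dc (L - 1)]
    have hL : (1 : Int) + (L - 1) = L := by ring
    have h2 := pv_mapseg 1 (L - 1) (fun k => (r + k * dr, c + k * dc))
      (fun k => (r + dr + k * dr, c + dc + k * dc))
      (fun k => by simp only [Prod.mk.injEq]; constructor <;> ring)
    rw [hL] at h2
    simp only [zero_add, h2]
    simp
termination_by L.toNat
decreasing_by omega

-- per cell, A's four nested if-blocks emit exactly the chosen template replayed by walks
lemma pv_cell_eq (height width length row col : Int)
    (domain : List (List (Int × Int))) :
    (let columns : List Int := PySem.List.pyRange col (col + length + 1) 1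
     let rows : List Int := PySem.List.pyRange row (row + length + 1) 1
     let domain :=
       if col + length ≤ width then
         let domain := domain ++ [columns.map (fun c => (row, c))]
         if row + length ≤ height then
           domain ++ [rows.map (fun r => (r, col + (r - row)))]
         else domain
       else domain
     if row + length ≤ height then
       let domain := domain ++ [rows.map (fun r => (r, col))]
       if col - length ≥ 0 then
         domain ++ [rows.map (fun r => (r, col - (r - row)))]
       else domain
     else domain) =
    (if row + length ≤ height then
        (if col + length ≤ width then [((0:Int), (1:Int))] else []) ++
          (if col + length ≤ width then [((1:Int), (1:Int))] else []) ++ [(1, 0)]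
          ++ (if col - length ≥ 0 then [((1:Int), (-1:Int))] else [])
      else if col + length ≤ width then [((0:Int), (1:Int))] else []).foldl
      (fun domain d => domain ++ [pvWalk row col d.1 d.2 (length + 1)]) domain := by
  have seg1 : (PySem.List.pyRange col (col + length + 1) 1).map (fun c => ((row : Int), c)) =
      pvWalk row col 0 1 (length + 1) := by
    rw [pv_walk_eq]
    have h : col + length + 1 = col + (length + 1) := by ring
    rw [h]
    exact pv_mapseg col (length + 1) _ _
      (fun k => by simp only [Prod.mk.injEq]; constructor <;> ring)
  have seg2 : (PySem.List.pyRange row (row + length + 1) 1).map (fun r => (r, col + (r - row))) =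
      pvWalk row col 1 1 (length + 1) := by
    rw [pv_walk_eq]
    have h : row + length + 1 = row + (length + 1) := by ring
    rw [h]
    exact pv_mapseg row (length + 1) _ _
      (fun k => by simp only [Prod.mk.injEq]; constructor <;> ring)
  have seg3 : (PySem.List.pyRange row (row + length + 1) 1).map (fun r => (r, (col : Int))) =
      pvWalk row col 1 0 (length + 1) := by
    rw [pv_walk_eq]
    have h : row + length + 1 = row + (length + 1) := by ring
    rw [h]
    exact pv_mapseg row (length + 1) _ _
      (fun k => by simp only [Prod.mk.injEq]; constructor <;> ring)
  have seg4 : (PySem.List.pyRange row (row + length + 1) 1).map (fun r => (r, col - (r - row))) =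
      pvWalk row col 1 (-1) (length + 1) := by
    rw [pv_walk_eq]
    have h : row + length + 1 = row + (length + 1) := by ring
    rw [h]
    exact pv_mapseg row (length + 1) _ _
      (fun k => by simp only [Prod.mk.injEq]; constructor <;> ring)
  simp only [seg1, seg2, seg3, seg4]
  split_ifs <;> simp [List.foldl]

-- ===== VERDICT (by name: the statement is the Claim_ definition above) =====
theorem generate_domain_spec : Claim_equal_generate_domain := by
  intro word grid _ _
  unfold Spec_generate_domain generate_domain generate_domain_alt
  simp only [pvTemplates, pv_enumerate_map_range, List.foldl_map]
  refine PySem.List.foldl_congr_mem _ _ _ _ (fun acc row hrow => ?_)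
  refine PySem.List.foldl_congr_mem _ _ _ _ (fun acc2 col hcol => ?_)
  exact pv_cell_eq _ _ _ _ _ acc2
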